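-- pv_equiv track=rewrite | github.com/kenkalang/Tucil-2-STIMA-Convex-Hull | src/fix.py | titikterpanjang
-- ===== SOURCE A (Python) =====
-- def determinan(titik1,titik2,titik3):
--     det = titik1[0]*titik2[1] + titik3[0]*titik1[1] + titik2[0]*titik3[1] - titik3[0]*titik2[1] - titik2[0]*titik1[1] - titik1[0]*titik3[1]
--     return det
--
-- def titikterpanjang(terpanjangx,terpanjangy,Upper):
--     Upper = sorted(Upper,key=lambda x:x[0])
--     temp = 0
--     terjauh = Upper[0]
--     for i in range (len(Upper)):
--         if determinan(terpanjangx,terpanjangy,Upper[i]) > temp: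
--             temp = determinan(terpanjangx,terpanjangy,Upper[i])
--             terjauh = Upper[i]
--     return terjauh
-- ===== SOURCE B (Python) =====
-- def determinan(titik1,titik2,titik3):
--     det = titik1[0]*titik2[1] + titik3[0]*titik1[1] + titik2[0]*titik3[1] - titik3[0]*titik2[1] - titik2[0]*titik1[1] - titik1[0]*titik3[1]
--     return det
--
-- def titikterpanjang(terpanjangx,terpanjangy,Upper):
--     # Single O(n) pass, no sorting: keep the leftmost point (first-minimal x) as the
--     # default, and the point with the largest positive determinant (ties: smaller x,
--     # then earlier) as the winner.
--     default = Upper[0]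
--     wd = 0
--     w = None
--     for p in Upper:
--         if p[0] < default[0]:
--             default = p
--         d = determinan(terpanjangx, terpanjangy, p)
--         if d > wd or (d == wd and w is not None and p[0] < w[0]):
--             wd = d
--             w = p
--     return w if w is not None else default
-- ===== Notes on version B (the rewrite author's own statement) =====
-- stated objective: faster
-- what changed: Replaces sort-then-scan with a single unsorted pass that tracks the leftmost point and the best positive-determinant point (ties broken by smaller x, then earlier position), reproducing the stable x-sort's selection without sorting.
import Mathlib
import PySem

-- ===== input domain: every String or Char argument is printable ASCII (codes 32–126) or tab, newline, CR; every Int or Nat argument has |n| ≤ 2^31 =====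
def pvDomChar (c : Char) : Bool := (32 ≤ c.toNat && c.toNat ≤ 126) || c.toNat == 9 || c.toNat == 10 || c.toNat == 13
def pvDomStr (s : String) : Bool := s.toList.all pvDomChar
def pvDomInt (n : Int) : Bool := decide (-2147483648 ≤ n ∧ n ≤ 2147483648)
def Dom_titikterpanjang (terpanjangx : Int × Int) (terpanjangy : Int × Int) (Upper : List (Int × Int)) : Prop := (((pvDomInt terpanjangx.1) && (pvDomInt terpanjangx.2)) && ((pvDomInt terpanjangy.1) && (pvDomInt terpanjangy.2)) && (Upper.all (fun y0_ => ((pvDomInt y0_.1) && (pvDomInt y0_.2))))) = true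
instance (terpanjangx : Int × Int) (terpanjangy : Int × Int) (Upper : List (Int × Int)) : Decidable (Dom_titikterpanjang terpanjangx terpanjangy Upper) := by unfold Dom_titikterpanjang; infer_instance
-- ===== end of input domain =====

-- B replaces A's sort-then-scan by a single unsorted pass (leftmost point as default,
-- best positive-determinant point with smaller-x/earlier tie-break as winner); objective: faster.


-- ===== PORT A =====
def determinan (titik1 titik2 titik3 : Int × Int) : Int :=
  titik1.1 * titik2.2 + titik3.1 * titik1.2 + titik2.1 * titik3.2
    - titik3.1 * titik2.2 - titik2.1 * titik1.2 - titik1.1 * titik3.2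

def titikterpanjang (terpanjangx : Int × Int) (terpanjangy : Int × Int) (Upper : List (Int × Int)) : Int × Int :=
  let U := PySem.List.sorted Upper (fun x => x.1)
  let terjauh := PySem.List.pyGetD U 0 (0, 0)       -- Upper[0]; Pre_ excludes the empty list (IndexError)
  let st := (PySem.List.pyRange 0 (U.length : Int) 1).foldl
    (fun (s : Int × (Int × Int)) i =>
      if determinan terpanjangx terpanjangy (PySem.List.pyGetD U i (0, 0)) > s.1 then
        (determinan terpanjangx terpanjangy (PySem.List.pyGetD U i (0, 0)), PySem.List.pyGetD U i (0, 0))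
      else s)
    (0, terjauh)
  st.2

-- ===== PORT B =====
def titikterpanjang_alt (terpanjangx : Int × Int) (terpanjangy : Int × Int) (Upper : List (Int × Int)) : Int × Int :=
  let st := Upper.foldl
    (fun (s : (Int × Int) × Int × Option (Int × Int)) p =>
      ((if p.1 < s.1.1 then p else s.1),
       if (match s.2.2 with
           | none => decide (s.2.1 < determinan terpanjangx terpanjangy p)
           | some w => decide (s.2.1 < determinan terpanjangx terpanjangy p)
               || (decide (determinan terpanjangx terpanjangy p = s.2.1) && decide (p.1 < w.1)))
       then (determinan terpanjangx terpanjangy p, some p)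
       else (s.2.1, s.2.2)))
    (PySem.List.pyGetD Upper 0 (0, 0), 0, none)     -- Upper[0]; Pre_ excludes the empty list (IndexError)
  match st.2.2 with
  | some w => w
  | none => st.1

-- ===== PRECONDITION & SPEC =====
-- Pre_ excludes exactly the empty list, on which A raises IndexError at Upper[0] (B's Upper[0] raises too).
def Pre_titikterpanjang (terpanjangx : Int × Int) (terpanjangy : Int × Int) (Upper : List (Int × Int)) : Prop := Upper ≠ []
instance (terpanjangx : Int × Int) (terpanjangy : Int × Int) (Upper : List (Int × Int)) : Decidable (Pre_titikterpanjang terpanjangx terpanjangy Upper) := by unfold Pre_titikterpanjang; infer_instance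
def pvWitness_titikterpanjang : (Int × Int) × (Int × Int) × (List (Int × Int)) := ((0, 0), (0, 1), [(1, 0)])

def Spec_titikterpanjang (terpanjangx : Int × Int) (terpanjangy : Int × Int) (Upper : List (Int × Int)) (out : Int × Int) : Prop := out = titikterpanjang_alt terpanjangx terpanjangy Upper
instance (terpanjangx : Int × Int) (terpanjangy : Int × Int) (Upper : List (Int × Int)) (out : Int × Int) : Decidable (Spec_titikterpanjang terpanjangx terpanjangy Upper out) := by unfold Spec_titikterpanjang; infer_instance

-- ===== CLAIM (what is proved, stated in full; the proofs are below) =====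
def Claim_equal_titikterpanjang : Prop := ∀ (terpanjangx : Int × Int) (terpanjangy : Int × Int) (Upper : List (Int × Int)), Dom_titikterpanjang terpanjangx terpanjangy Upper → Pre_titikterpanjang terpanjangx terpanjangy Upper → Spec_titikterpanjang terpanjangx terpanjangy Upper (titikterpanjang terpanjangx terpanjangy Upper)

-- ===== LEMMAS AND PROOFS =====


def scanA (d : Int × Int → Int) (s : Int × (Int × Int)) (L : List (Int × Int)) : Int × (Int × Int) :=
  L.foldl (fun s p => if d p > s.1 then (d p, p) else s) s

def foldDef (r : Int × Int) (L : List (Int × Int)) : Int × Int :=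
  L.foldl (fun b p => if p.1 < b.1 then p else b) r

def foldWin (d : Int × Int → Int) (s : Int × Option (Int × Int)) (L : List (Int × Int)) : Int × Option (Int × Int) :=
  L.foldl (fun s p =>
    if (match s.2 with
        | none => decide (s.1 < d p)
        | some w => decide (s.1 < d p) || (decide (d p = s.1) && decide (p.1 < w.1)))
    then (d p, some p) else s) s

def ffold (d : Int × Int → Int) (r : Int × Int) (L : List (Int × Int)) : Int × Int :=
  L.foldl (fun s p => if d s < d p ∨ (d p = d s ∧ p.1 < s.1) then p else s) r

theorem scanA_char (d : Int × Int → Int) :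
    ∀ (L : List (Int × Int)) (t : Int) (r : Int × Int),
      (scanA d (t, r) L = (t, r) ∧ ∀ q ∈ L, d q ≤ t)
      ∨ (∃ M w, scanA d (t, r) L = (M, w) ∧ t < M ∧ d w = M ∧ (∀ q ∈ L, d q ≤ M)
          ∧ L.find? (fun q => decide (M ≤ d q)) = some w) := by
  intro L
  induction L with
  | nil => intro t r; left; exact ⟨rfl, by simp⟩
  | cons p L ih =>
    intro t r
    by_cases hp : d p > t
    · have hstep : scanA d (t, r) (p :: L) = scanA d (d p, p) L := by
        simp [scanA, hp]
      rcases ih (d p) p with ⟨heq, hall⟩ | ⟨M, w, heq, hM, hdw, hall, hfind⟩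
      · right
        refine ⟨d p, p, by rw [hstep, heq], hp, rfl, ?_, ?_⟩
        · intro q hq; rcases List.mem_cons.mp hq with rfl | hq
          · exact le_refl _
          · exact hall q hq
        · simp [List.find?_cons]
      · right
        refine ⟨M, w, by rw [hstep, heq], lt_trans hp hM, hdw, ?_, ?_⟩
        · intro q hq; rcases List.mem_cons.mp hq with rfl | hq
          · exact le_of_lt hM
          · exact hall q hq
        · have : (decide (M ≤ d p) : Bool) = false := by simp; omega
          simp only [List.find?_cons, this]
          exact hfind
    · have hstep : scanA d (t, r) (p :: L) = scanA d (t, r) L := by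
        simp [scanA, hp]
      push_neg at hp
      rcases ih t r with ⟨heq, hall⟩ | ⟨M, w, heq, hM, hdw, hall, hfind⟩
      · left
        refine ⟨by rw [hstep, heq], ?_⟩
        intro q hq; rcases List.mem_cons.mp hq with rfl | hq
        · exact hp
        · exact hall q hq
      · right
        refine ⟨M, w, by rw [hstep, heq], hM, hdw, ?_, ?_⟩
        · intro q hq; rcases List.mem_cons.mp hq with rfl | hq
          · exact le_of_lt (lt_of_le_of_lt hp hM)
          · exact hall q hq
        · have : (decide (M ≤ d p) : Bool) = false := by simp; omega
          simp only [List.find?_cons, this]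
          exact hfind

theorem ffold_char (d : Int × Int → Int) :
    ∀ (L : List (Int × Int)) (r : Int × Int),
      (∀ q ∈ r :: L, d q < d (ffold d r L) ∨ (d q = d (ffold d r L) ∧ (ffold d r L).1 ≤ q.1))
      ∧ (r :: L).find? (fun q => decide (d (ffold d r L) ≤ d q) && decide (q.1 ≤ (ffold d r L).1))
          = some (ffold d r L) := by
  intro L
  induction L with
  | nil =>
    intro r
    constructor
    · intro q hq; rcases List.mem_cons.mp hq with rfl | hq
      · right; exact ⟨rfl, le_refl _⟩
      · simp at hq
    · simp [ffold, List.find?_cons]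
  | cons p L ih =>
    intro r
    by_cases hupd : d r < d p ∨ (d p = d r ∧ p.1 < r.1)
    · have hstep : ffold d r (p :: L) = ffold d p L := by simp [ffold, hupd]
      obtain ⟨ihb, ihf⟩ := ih p
      set w := ffold d p L with hw
      have hbp := ihb p (by simp)
      -- w lex-dominates r strictly through p
      have hbr : d r < d w ∨ (d r = d w ∧ w.1 < r.1) := by
        rcases hbp with h1 | ⟨h2, h3⟩
        · rcases hupd with h | ⟨h, _⟩
          · left; omega
          · left; omega
        · rcases hupd with h | ⟨h, h'⟩
          · left; omega
          · right; constructor; omega; omega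
      rw [hstep]
      constructor
      · intro q hq; rcases List.mem_cons.mp hq with rfl | hq
        · rcases hbr with h | ⟨h1, h2⟩
          · left; exact h
          · right; exact ⟨h1, le_of_lt h2⟩
        · exact ihb q hq
      · have hrfail : (decide (d w ≤ d r) && decide (r.1 ≤ w.1)) = false := by
          rcases hbr with h | ⟨h1, h2⟩
          · have : (decide (d w ≤ d r) : Bool) = false := by simp; omega
            simp [this]
          · have : (decide (r.1 ≤ w.1) : Bool) = false := by simp; omega
            simp [this]
        simp only [List.find?_cons, hrfail]
        exact ihf
    · have hstep : ffold d r (p :: L) = ffold d r L := by simp [ffold, hupd]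
      obtain ⟨ihb, ihf⟩ := ih r
      set w := ffold d r L with hw
      push_neg at hupd
      have hbr := ihb r (by simp)
      have hbp : d p < d w ∨ (d p = d w ∧ w.1 ≤ p.1) := by
        rcases hbr with h | ⟨h1, h2⟩
        · by_cases h' : d p = d r
          · left; omega
          · have := hupd.1; left; omega
        · by_cases h' : d p = d r
          · right; refine ⟨by omega, ?_⟩
            have := hupd.2 h'
            omega
          · have := hupd.1
            left; omega
      rw [hstep]
      constructor
      · intro q hq
        rcases List.mem_cons.mp hq with rfl | hq2
        · exact hbr
        · rcases List.mem_cons.mp hq2 with rfl | hq3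
          · exact hbp
          · exact ihb q (by simp [hq3])
      · by_cases hr : (decide (d w ≤ d r) && decide (r.1 ≤ w.1)) = true
        · -- then find? (r :: L) returned r, i.e. w = r
          have : some r = some w := by
            simpa [List.find?_cons, hr] using ihf
          simp only [List.find?_cons, hr]
          simpa using this
        · have hrfail : (decide (d w ≤ d r) && decide (r.1 ≤ w.1)) = false := by
            simpa using hr
          have hpfail : (decide (d w ≤ d p) && decide (p.1 ≤ w.1)) = false := by
            rcases hbp with h | ⟨h1, h2⟩
            · have : (decide (d w ≤ d p) : Bool) = false := by simp; omega
              simp [this]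
            · by_cases hx : p.1 ≤ w.1
              · -- then p.1 = w.1 and d p = d w; contradict hrfail via hupd
                exfalso
                have hpw : p.1 = w.1 := le_antisymm hx h2
                rcases hbr with hh | ⟨hh1, hh2⟩
                · have := hupd.1; omega
                · have := hupd.2 (by omega)
                  have : ¬ (d w ≤ d r ∧ r.1 ≤ w.1) := by
                    intro ⟨a, b⟩
                    exact absurd (by simp [a, b] : (decide (d w ≤ d r) && decide (r.1 ≤ w.1)) = true) (by simp [hrfail])
                  omega
              · simp [hx]
          simp only [List.find?_cons, hrfail, hpfail]
          simpa [List.find?_cons, hrfail] using ihf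


theorem foldWin_some (d : Int × Int → Int) :
    ∀ (L : List (Int × Int)) (M : Int) (w : Int × Int), d w = M →
      foldWin d (M, some w) L = (d (ffold d w L), some (ffold d w L)) := by
  intro L
  induction L with
  | nil => intro M w h; simp [foldWin, ffold, h]
  | cons p L ih =>
    intro M w h
    by_cases hupd : d w < d p ∨ (d p = d w ∧ p.1 < w.1)
    · have hb : (decide (M < d p) || (decide (d p = M) && decide (p.1 < w.1))) = true := by
        subst h
        rcases hupd with h1 | ⟨h1, h2⟩
        · simp [h1]
        · simp [h1, h2]
      have h1 : foldWin d (M, some w) (p :: L) = foldWin d (d p, some p) L := by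
        simp [foldWin, hb]
      have h2 : ffold d w (p :: L) = ffold d p L := by simp [ffold, hupd]
      rw [h1, h2, ih (d p) p rfl]
    · have hb : (decide (M < d p) || (decide (d p = M) && decide (p.1 < w.1))) = false := by
        subst h; push_neg at hupd
        by_cases h1 : d p = d w
        · simp [h1, hupd.2 h1]
        · have := hupd.1
          have : ¬ d w < d p := by omega
          simp [h1, this]
      have h1 : foldWin d (M, some w) (p :: L) = foldWin d (M, some w) L := by
        simp [foldWin, hb]
      have h2 : ffold d w (p :: L) = ffold d w L := by simp [ffold, hupd]
      rw [h1, h2, ih M w h]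

theorem foldWin_char (d : Int × Int → Int) :
    ∀ L : List (Int × Int),
      ((∀ q ∈ L, d q ≤ 0) ∧ foldWin d (0, none) L = (0, none))
      ∨ (∃ p L1 L2, L = L1 ++ p :: L2 ∧ (∀ q ∈ L1, d q ≤ 0) ∧ 0 < d p
          ∧ foldWin d (0, none) L = (d (ffold d p L2), some (ffold d p L2))) := by
  intro L
  induction L with
  | nil => left; exact ⟨by simp, rfl⟩
  | cons q L ih =>
    by_cases hq : 0 < d q
    · right
      have h1 : foldWin d (0, none) (q :: L) = foldWin d (d q, some q) L := by
        simp [foldWin, hq]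
      refine ⟨q, [], L, by simp, by simp, hq, ?_⟩
      rw [h1, foldWin_some d L (d q) q rfl]
    · have h1 : foldWin d (0, none) (q :: L) = foldWin d (0, none) L := by
        have : (decide ((0:Int) < d q) : Bool) = false := by simpa using hq
        simp [foldWin, this]
      rcases ih with ⟨hall, heq⟩ | ⟨p, L1, L2, hsp, hL1, hp, heq⟩
      · left
        refine ⟨?_, by rw [h1, heq]⟩
        intro x hx; rcases List.mem_cons.mp hx with rfl | hx
        · omega
        · exact hall x hx
      · right
        refine ⟨p, q :: L1, L2, by simp [hsp], ?_, hp, by rw [h1, heq]⟩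
        intro x hx; rcases List.mem_cons.mp hx with rfl | hx
        · omega
        · exact hL1 x hx

theorem foldDef_find :
    ∀ (L : List (Int × Int)) (r : Int × Int),
      (r :: L).find? (fun p => decide (p.1 ≤ (foldDef r L).1)) = some (foldDef r L)
      ∧ ∀ p ∈ r :: L, (foldDef r L).1 ≤ p.1 := by
  intro L
  induction L with
  | nil =>
    intro r
    constructor
    · simp [foldDef, List.find?_cons]
    · intro p hp; rcases List.mem_cons.mp hp with rfl | h
      · exact le_refl _
      · simp at h
  | cons p L ih =>
    intro r
    by_cases hpr : p.1 < r.1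
    · have hstep : foldDef r (p :: L) = foldDef p L := by simp [foldDef, hpr]
      obtain ⟨ihf, ihb⟩ := ih p
      set F := foldDef p L with hF
      have hFp : F.1 ≤ p.1 := ihb p (by simp)
      rw [hstep]
      constructor
      · have hrfail : (decide (r.1 ≤ F.1) : Bool) = false := by simp; omega
        simp only [List.find?_cons, hrfail]
        exact ihf
      · intro q hq; rcases List.mem_cons.mp hq with rfl | hq2
        · omega
        · exact ihb q hq2
    · have hstep : foldDef r (p :: L) = foldDef r L := by simp [foldDef, hpr]
      obtain ⟨ihf, ihb⟩ := ih r
      set F := foldDef r L with hF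
      have hFr : F.1 ≤ r.1 := ihb r (by simp)
      rw [hstep]
      constructor
      · by_cases hr : (decide (r.1 ≤ F.1) : Bool) = true
        · have : some r = some F := by simpa [List.find?_cons, hr] using ihf
          simp only [List.find?_cons, hr]
          simpa using this
        · have hrfail : (decide (r.1 ≤ F.1) : Bool) = false := by simpa using hr
          have hpfail : (decide (p.1 ≤ F.1) : Bool) = false := by
            simp only [decide_eq_false_iff_not] at hrfail ⊢
            push_neg at hpr
            omega
          simp only [List.find?_cons, hrfail, hpfail]
          simpa [List.find?_cons, hrfail] using ihf
      · intro q hq; rcases List.mem_cons.mp hq with rfl | hq2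
        · exact hFr
        · rcases List.mem_cons.mp hq2 with rfl | hq3
          · push_neg at hpr; omega
          · exact ihb q (by simp [hq3])

theorem bfold_split (d : Int × Int → Int) (L : List (Int × Int)) (r0 : Int × Int) (s0 : Int × Option (Int × Int)) :
    L.foldl (fun (s : (Int × Int) × Int × Option (Int × Int)) p =>
      ((if p.1 < s.1.1 then p else s.1),
       if (match s.2.2 with
           | none => decide (s.2.1 < d p)
           | some w => decide (s.2.1 < d p) || (decide (d p = s.2.1) && decide (p.1 < w.1)))
       then (d p, some p) else (s.2.1, s.2.2))) (r0, s0)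
    = (foldDef r0 L, foldWin d s0 L) := by
  induction L generalizing r0 s0 with
  | nil => rfl
  | cons p L ih =>
    obtain ⟨M, o⟩ := s0
    simp only [List.foldl_cons]
    rw [ih]
    rfl


theorem insertBy_cons (x : Int × Int) (zs : List (Int × Int))
    (h : ∀ z ∈ zs, x.1 < z.1) :
    PySem.List.insertBy (fun a b : Int × Int => decide (a.1 < b.1)) x zs = x :: zs := by
  cases zs with
  | nil => simp [PySem.List.insertBy]
  | cons z t => simp [PySem.List.insertBy, h z (by simp)]

theorem find?_filter' (P Q : Int × Int → Bool) (L : List (Int × Int)) :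
    (L.filter P).find? Q = L.find? (fun x => P x && Q x) := by
  induction L with
  | nil => rfl
  | cons x t ih =>
    by_cases hP : P x <;> by_cases hQ : Q x <;>
      simp [List.filter_cons, List.find?_cons, hP, hQ, ih]

theorem find?_append_skip (P : Int × Int → Bool) (L M : List (Int × Int))
    (h : ∀ x ∈ L, P x = false) : (L ++ M).find? P = M.find? P := by
  induction L with
  | nil => rfl
  | cons x t ih =>
    simp only [List.cons_append, List.find?_cons, h x (by simp)]
    exact ih (fun y hy => h y (by simp [hy]))

theorem find?_cons_dup (P : Int × Int → Bool) (x : Int × Int) (t : List (Int × Int)) :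
    (x :: x :: t).find? P = (x :: t).find? P := by
  by_cases h : P x <;> simp [List.find?_cons, h]

theorem sorted_append_singleton (L : List (Int × Int)) (p : Int × Int) :
    PySem.List.sorted (L ++ [p]) (fun x => x.1)
      = PySem.List.insertBy (fun a b : Int × Int => decide (a.1 < b.1)) p (PySem.List.sorted L (fun x => x.1)) := by
  rw [PySem.List.sorted_eq_foldl_insertBy, PySem.List.sorted_eq_foldl_insertBy, List.foldl_append]
  rfl


theorem filter_insertBy (P : Int × Int → Bool) (x : Int × Int) (ys : List (Int × Int))
    (hs : ys.Pairwise (fun a b => a.1 ≤ b.1)) :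
    (PySem.List.insertBy (fun a b : Int × Int => decide (a.1 < b.1)) x ys).filter P
      = if P x then PySem.List.insertBy (fun a b : Int × Int => decide (a.1 < b.1)) x (ys.filter P)
        else ys.filter P := by
  induction ys with
  | nil => by_cases hP : P x <;> simp [PySem.List.insertBy, hP]
  | cons y t ih =>
    obtain ⟨hy, ht⟩ := List.pairwise_cons.mp hs
    by_cases hxy : x.1 < y.1
    · rw [show PySem.List.insertBy (fun a b : Int × Int => decide (a.1 < b.1)) x (y :: t) = x :: y :: t by
        simp [PySem.List.insertBy, hxy]]
      by_cases hP : P x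
      · by_cases hPy : P y
        · rw [show (y :: t).filter P = y :: t.filter P by simp [List.filter_cons, hPy]]
          rw [show PySem.List.insertBy (fun a b : Int × Int => decide (a.1 < b.1)) x (y :: t.filter P)
                = x :: y :: t.filter P by simp [PySem.List.insertBy, hxy]]
          simp [List.filter_cons, hP, hPy]
        · rw [show (y :: t).filter P = t.filter P by simp [List.filter_cons, hPy]]
          rw [insertBy_cons x (t.filter P) (fun z hz => lt_of_lt_of_le hxy (hy z (List.mem_of_mem_filter hz)))]
          simp [List.filter_cons, hP, hPy]
      · simp [List.filter_cons, hP]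
    · rw [show PySem.List.insertBy (fun a b : Int × Int => decide (a.1 < b.1)) x (y :: t)
            = y :: PySem.List.insertBy (fun a b : Int × Int => decide (a.1 < b.1)) x t by
        simp [PySem.List.insertBy, hxy]]
      by_cases hP : P x <;> by_cases hPy : P y <;>
        simp [List.filter_cons, hP, hPy, ih ht, PySem.List.insertBy, hxy]

theorem filter_sorted (P : Int × Int → Bool) (L : List (Int × Int)) :
    (PySem.List.sorted L (fun x => x.1)).filter P = PySem.List.sorted (L.filter P) (fun x => x.1) := by
  induction L using List.reverseRecOn with
  | nil => rfl
  | append_singleton L p ih =>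
    rw [sorted_append_singleton, filter_insertBy P p _ (PySem.List.sorted_pairwise L _), ih,
      List.filter_append]
    by_cases hP : P p
    · simp only [hP, if_true, List.filter_cons, List.filter_nil, sorted_append_singleton]
    · simp [hP]

theorem head_sorted_find (L : List (Int × Int)) (m : Int)
    (hlb : ∀ p ∈ L, m ≤ p.1) (hmem : ∃ p ∈ L, p.1 = m) :
    (PySem.List.sorted L (fun x => x.1)).head? = L.find? (fun p => decide (p.1 ≤ m)) := by
  obtain ⟨p0, hp0, hp0m⟩ := hmem
  have hLne : L ≠ [] := by rintro rfl; simp at hp0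
  obtain ⟨h, t, hS⟩ : ∃ h t, PySem.List.sorted L (fun x => x.1) = h :: t := by
    cases hSc : PySem.List.sorted L (fun x => x.1) with
    | nil => exact absurd ((PySem.List.sorted_eq_nil_iff L _ _).mp hSc) hLne
    | cons h t => exact ⟨h, t, rfl⟩
  have hPh : (decide (h.1 ≤ m) : Bool) = true := by
    have := PySem.List.key_head_sorted_le L (fun x => x.1) hS p0 hp0
    simp only [hp0m] at this
    simpa using this
  -- all elements of the filtered list have x-coordinate exactly m
  have hpw : (L.filter (fun p => decide (p.1 ≤ m))).Pairwise (fun a b => a.1 ≤ b.1) := by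
    refine List.pairwise_of_forall_mem_list ?_
    intro a ha b hb
    obtain ⟨haL, haP⟩ := List.mem_filter.mp ha
    obtain ⟨hbL, hbP⟩ := List.mem_filter.mp hb
    have : a.1 ≤ m := by simpa using haP
    have : m ≤ b.1 := hlb b hbL
    omega
  have hfs := filter_sorted (fun p => decide (p.1 ≤ m)) L
  rw [PySem.List.sorted_eq_self_of_pairwise _ _ hpw] at hfs
  rw [← List.head?_filter, ← hfs, hS]
  simp [List.filter_cons, hPh]


-- ===== MAIN PROOF =====

theorem titikterpanjang_eq_alt (tx ty : Int × Int) (Upper : List (Int × Int)) (hne : Upper ≠ []) :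
    titikterpanjang tx ty Upper = titikterpanjang_alt tx ty Upper := by
  obtain ⟨u0, rest, hU⟩ : ∃ u0 rest, Upper = u0 :: rest := by
    cases Upper with
    | nil => exact absurd rfl hne
    | cons a l => exact ⟨a, l, rfl⟩
  obtain ⟨s0, S', hSeq⟩ : ∃ s0 S', PySem.List.sorted Upper (fun x => x.1) = s0 :: S' := by
    cases hSc : PySem.List.sorted Upper (fun x => x.1) with
    | nil => exact absurd ((PySem.List.sorted_eq_nil_iff Upper _ _).mp hSc) hne
    | cons a l => exact ⟨a, l, rfl⟩
  -- A is the scan over the sorted list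
  have hA : titikterpanjang tx ty Upper
      = (scanA (determinan tx ty)
          (0, PySem.List.pyGetD (PySem.List.sorted Upper (fun x => x.1)) 0 (0, 0))
          (PySem.List.sorted Upper (fun x => x.1))).2 :=
    congrArg Prod.snd (PySem.List.foldl_pyRange_zero_pyGetD'
      (PySem.List.sorted Upper (fun x => x.1)) (0, 0)
      (fun s q => if determinan tx ty q > s.1 then (determinan tx ty q, q) else s)
      (0, PySem.List.pyGetD (PySem.List.sorted Upper (fun x => x.1)) 0 (0, 0)))
  -- B is the product of the two simple folds
  have hst := bfold_split (determinan tx ty) Upper (PySem.List.pyGetD Upper 0 (0, 0)) (0, none)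
  have hB : titikterpanjang_alt tx ty Upper
      = (match (foldWin (determinan tx ty) (0, none) Upper).2 with
         | some w => w
         | none => foldDef (PySem.List.pyGetD Upper 0 (0, 0)) Upper) :=
    congrArg (fun st : (Int × Int) × Int × Option (Int × Int) =>
      (match st.2.2 with | some w => w | none => st.1 : Int × Int)) hst
  have hr0 : PySem.List.pyGetD Upper 0 (0, 0) = u0 := by
    rw [hU]; exact PySem.List.pyGetD_zero_cons u0 rest (0, 0)
  rcases foldWin_char (determinan tx ty) Upper with ⟨hall, heq⟩ | ⟨p, L1, L2, hsplit, hL1, hp, heq⟩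
  · -- no point has positive determinant: A returns the sorted head, B the leftmost point
    have hB2 : titikterpanjang_alt tx ty Upper = foldDef (PySem.List.pyGetD Upper 0 (0, 0)) Upper := by
      rw [hB, heq]
    rcases scanA_char (determinan tx ty) (PySem.List.sorted Upper (fun x => x.1)) 0
        (PySem.List.pyGetD (PySem.List.sorted Upper (fun x => x.1)) 0 (0, 0)) with
      ⟨heqA, hallA⟩ | ⟨M, w, heqA, hM, hdw, hub, hfind⟩
    · -- A = sorted head
      obtain ⟨hfindD, hlbD⟩ := foldDef_find Upper (PySem.List.pyGetD Upper 0 (0, 0))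
      have hFmem : foldDef (PySem.List.pyGetD Upper 0 (0, 0)) Upper ∈ Upper := by
        rcases List.mem_cons.mp (List.mem_of_find?_eq_some hfindD) with h | h
        · rw [h, hr0, hU]; exact List.mem_cons_self
        · exact h
      have hhead := head_sorted_find Upper (foldDef (PySem.List.pyGetD Upper 0 (0, 0)) Upper).1
        (fun q hq => hlbD q (List.mem_cons_of_mem _ hq)) ⟨_, hFmem, rfl⟩
      have hfindU : Upper.find?
          (fun q => decide (q.1 ≤ (foldDef (PySem.List.pyGetD Upper 0 (0, 0)) Upper).1))
          = some (foldDef (PySem.List.pyGetD Upper 0 (0, 0)) Upper) := by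
        have h1 := hfindD
        rw [hr0, hU] at h1
        rw [hr0, hU, ← find?_cons_dup]
        exact h1
      rw [hA, heqA, hB2]
      have : some s0 = some (foldDef (PySem.List.pyGetD Upper 0 (0, 0)) Upper) := by
        rw [← hfindU, ← hhead, hSeq]; rfl
      rw [hSeq, PySem.List.pyGetD_zero_cons]
      exact Option.some.inj this
    · -- impossible: some determinant would be positive
      exfalso
      have hwU : w ∈ Upper := by
        have := List.mem_of_find?_eq_some hfind
        exact (PySem.List.mem_sorted Upper _ _ w).mp this
      have := hall w hwU
      omega
  · -- some point has positive determinant: both return the first best point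
    have hB2 : titikterpanjang_alt tx ty Upper = ffold (determinan tx ty) p L2 := by
      rw [hB, heq]
    have hpU : p ∈ Upper := by rw [hsplit]; exact List.mem_append_right _ List.mem_cons_self
    rcases scanA_char (determinan tx ty) (PySem.List.sorted Upper (fun x => x.1)) 0
        (PySem.List.pyGetD (PySem.List.sorted Upper (fun x => x.1)) 0 (0, 0)) with
      ⟨heqA, hallA⟩ | ⟨M, w, heqA, hM, hdw, hub, hfind⟩
    · exfalso
      have := hallA p ((PySem.List.mem_sorted Upper _ _ p).mpr hpU)
      omega
    · obtain ⟨ffb, fffind⟩ := ffold_char (determinan tx ty) L2 p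
      have hw2mem : ffold (determinan tx ty) p L2 ∈ p :: L2 := List.mem_of_find?_eq_some fffind
      have hw2U : ffold (determinan tx ty) p L2 ∈ Upper := by
        rw [hsplit]; exact List.mem_append_right _ hw2mem
      have hubU : ∀ q ∈ Upper, determinan tx ty q ≤ M :=
        fun q hq => hub q ((PySem.List.mem_sorted Upper _ _ q).mpr hq)
      have hwU : w ∈ Upper :=
        (PySem.List.mem_sorted Upper _ _ w).mp (List.mem_of_find?_eq_some hfind)
      have hwp : w ∈ p :: L2 := by
        rcases List.mem_append.mp (by rw [← hsplit]; exact hwU) with h | h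
        · exfalso; have := hL1 w h; omega
        · exact h
      have hMw2 : determinan tx ty (ffold (determinan tx ty) p L2) = M := by
        rcases ffb w hwp with h | ⟨h1, h2⟩
        · exfalso; have := hubU _ hw2U; omega
        · omega
      have e2 : (PySem.List.sorted Upper (fun x => x.1)).find? (fun q => decide (M ≤ determinan tx ty q))
          = Upper.find? (fun q => decide (M ≤ determinan tx ty q)
              && decide (q.1 ≤ (ffold (determinan tx ty) p L2).1)) := by
        rw [← List.head?_filter, filter_sorted,
          head_sorted_find (Upper.filter (fun q => decide (M ≤ determinan tx ty q)))
            (ffold (determinan tx ty) p L2).1 ?lb ?mem]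
        · exact find?_filter' _ _ _
        case lb =>
          intro q hq
          obtain ⟨hqU, hqP⟩ := List.mem_filter.mp hq
          have hdqM : determinan tx ty q = M := le_antisymm (hubU q hqU) (by simpa using hqP)
          have hqp : q ∈ p :: L2 := by
            rcases List.mem_append.mp (by rw [← hsplit]; exact hqU) with h | h
            · exfalso; have := hL1 q h; omega
            · exact h
          rcases ffb q hqp with h | ⟨h1, h2⟩
          · exfalso; omega
          · exact h2
        case mem =>
          exact ⟨_, List.mem_filter.mpr ⟨hw2U, by simp [hMw2]⟩, rfl⟩
      have c6 : (p :: L2).find? (fun q => decide (M ≤ determinan tx ty q)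
          && decide (q.1 ≤ (ffold (determinan tx ty) p L2).1)) = some (ffold (determinan tx ty) p L2) := by
        have h1 := fffind
        rw [hMw2] at h1
        exact h1
      have final : some w = some (ffold (determinan tx ty) p L2) := by
        rw [← hfind, e2, hsplit, find?_append_skip _ L1 (p :: L2) ?fail, c6]
        case fail =>
          intro x hx
          have := hL1 x hx
          have : (decide (M ≤ determinan tx ty x) : Bool) = false := by simp; omega
          simp [this]
      rw [hA, heqA, hB2]
      exact Option.some.inj final

-- ===== VERDICT (by name: the statement is the Claim_ definition above) =====
theorem titikterpanjang_spec : Claim_equal_titikterpanjang := by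
  unfold Claim_equal_titikterpanjang
  intro tx ty Upper _ hne
  exact titikterpanjang_eq_alt tx ty Upper hne
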